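-- pv_equiv track=rewrite | github.com/paiml/depyler | examples/hard_prac_fs_fat.py | fat_alloc_chain
-- ===== SOURCE A (Python) =====
-- def fat_alloc_chain(fat: list[int], num_clusters: int, needed: int) -> int:
--     """Allocate a chain of clusters. Returns first cluster or -1."""
--     if needed == 0:
--         return 0 - 1
--     first: int = 0 - 1
--     prev: int = 0 - 1
--     allocated: int = 0
--     i: int = 0
--     while i < num_clusters:
--         if allocated >= needed:
--             i = num_clusters
--         else:
--             f: int = fat[i]
--             if f == (0 - 1):
--                 if first < 0:
--                     first = i
--                 if prev >= 0:
--                     fat[prev] = i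
--                 prev = i
--                 fat[i] = 0 - 2
--                 allocated = allocated + 1
--         i = i + 1
--     if allocated < needed:
--         return 0 - 1
--     return first
-- ===== SOURCE B (Python) =====
-- def fat_alloc_chain(fat: list[int], num_clusters: int, needed: int) -> int:
--     """Two-pass: first collect the free clusters, then link them as a chain.
--     Mutates `fat` like the original (links the chain even on failure)."""
--     if needed == 0:
--         return -1
--     chosen: list[int] = []
--     i = 0
--     while i < num_clusters and len(chosen) < needed:
--         if fat[i] == -1:
--             chosen.append(i)
--         i += 1
--     for k in range(len(chosen) - 1):
--         fat[chosen[k]] = chosen[k + 1]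
--     if chosen:
--         fat[chosen[-1]] = -2
--     if chosen and len(chosen) >= needed:
--         return chosen[0]
--     return -1
-- ===== Notes on version B (the rewrite author's own statement) =====
-- stated objective: alternative
-- what changed: Replaces A's one-pass state machine (first/prev/allocated registers updated while scanning) by two separated passes: collect the free cluster indices into a list, then link consecutive entries and terminate the chain.
import Mathlib
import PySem

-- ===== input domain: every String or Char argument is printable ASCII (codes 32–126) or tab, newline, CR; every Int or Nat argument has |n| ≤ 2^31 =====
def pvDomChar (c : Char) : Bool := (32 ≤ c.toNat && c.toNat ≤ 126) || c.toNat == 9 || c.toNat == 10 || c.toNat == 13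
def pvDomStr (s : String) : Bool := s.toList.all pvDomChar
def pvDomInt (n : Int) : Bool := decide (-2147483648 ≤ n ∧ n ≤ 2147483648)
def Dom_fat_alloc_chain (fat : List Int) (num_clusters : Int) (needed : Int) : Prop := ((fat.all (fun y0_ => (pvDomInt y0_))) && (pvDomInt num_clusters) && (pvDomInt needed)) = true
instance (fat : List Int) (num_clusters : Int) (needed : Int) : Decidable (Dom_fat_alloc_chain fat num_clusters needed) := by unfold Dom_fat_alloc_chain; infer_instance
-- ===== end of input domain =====

-- B replaces A's single-pass state machine (first/prev/allocated registers updated while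
-- scanning) by two passes: collect the free cluster indices, then link them; objective:
-- alternative decomposition.  A mutates `fat` in place; the equivalence proved here is
-- about the RETURN value only (Python B performs the same mutation wherever A returns).

-- ===== PORT A =====
-- The while loop of A: state (fat, first, prev, allocated, i); fuel bounds the iterations
-- (the loop runs at most num_clusters.toNat times since i starts at 0 and increases by 1).
-- `fat[i]` is PySem.List.pyGet?; on none (Python IndexError, excluded by Pre_) we stop.
-- `fat[prev] = i` / `fat[i] = -2`: prev ≥ 0 (resp. 0 ≤ i < len) hold in those branches,
-- so List.set with .toNat is exact.
def fatAllocLoopA (num_clusters needed : Int) :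
    Nat → List Int → Int → Int → Int → Int → Int × Int
  | 0, _fat, first, _prev, allocated, _i => (first, allocated)
  | fuel+1, fat, first, prev, allocated, i =>
    if i < num_clusters then
      if allocated ≥ needed then (first, allocated)      -- i := num_clusters; loop exits
      else
        match PySem.List.pyGet? fat i with
        | none => (first, allocated)                     -- IndexError (outside Pre_)
        | some f =>
          if f = -1 then
            let first' := if first < 0 then i else first
            let fat' := if prev ≥ 0 then fat.set prev.toNat i else fat
            let fat'' := fat'.set i.toNat (-2)
            fatAllocLoopA num_clusters needed fuel fat'' first' i (allocated + 1) (i + 1)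
          else
            fatAllocLoopA num_clusters needed fuel fat first prev allocated (i + 1)
    else (first, allocated)

def fat_alloc_chain (fat : List Int) (num_clusters : Int) (needed : Int) : Int :=
  if needed = 0 then 0 - 1
  else
    let r := fatAllocLoopA num_clusters needed num_clusters.toNat fat (0 - 1) (0 - 1) 0 0
    if r.2 < needed then 0 - 1 else r.1

-- ===== PORT B =====
-- Pass 1 of B: collect indices of free clusters; stops when enough are chosen, when i
-- reaches num_clusters, or on IndexError (none from pyGet?, outside Pre_).
def fatAllocLoopB (num_clusters needed : Int) :
    Nat → List Int → List Int → Int → List Int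
  | 0, _fat, chosen, _i => chosen
  | fuel+1, fat, chosen, i =>
    if i < num_clusters ∧ (chosen.length : Int) < needed then
      match PySem.List.pyGet? fat i with
      | none => chosen                                   -- IndexError (outside Pre_)
      | some f =>
        if f = -1 then fatAllocLoopB num_clusters needed fuel fat (chosen ++ [i]) (i + 1)
        else fatAllocLoopB num_clusters needed fuel fat chosen (i + 1)
    else chosen

-- Pass 2 of B only mutates `fat` (linking), which a Lean port of the return value drops.
-- `chosen[0]` is read under the guard chosen ≠ [], so headI is exact there.
def fat_alloc_chain_alt (fat : List Int) (num_clusters : Int) (needed : Int) : Int :=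
  if needed = 0 then -1
  else
    let chosen := fatAllocLoopB num_clusters needed num_clusters.toNat fat [] 0
    if chosen ≠ [] ∧ needed ≤ (chosen.length : Int) then chosen.headI else -1

-- ===== PRECONDITION & SPEC =====
-- Pre_ excludes exactly the inputs on which Python A raises IndexError: the scan walks
-- past the end of `fat` when num_clusters exceeds its length and fewer than `needed`
-- free (-1) entries are found first.  (Python B raises there as well.)
def Pre_fat_alloc_chain (fat : List Int) (num_clusters : Int) (needed : Int) : Prop :=
  needed = 0 ∨ num_clusters ≤ (fat.length : Int) ∨ needed ≤ (fat.count (-1) : Int)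
instance (fat : List Int) (num_clusters : Int) (needed : Int) : Decidable (Pre_fat_alloc_chain fat num_clusters needed) := by unfold Pre_fat_alloc_chain; infer_instance

def pvWitness_fat_alloc_chain : List Int × Int × Int := ([-1, 3, -1, -1], 4, 2)

def Spec_fat_alloc_chain (fat : List Int) (num_clusters : Int) (needed : Int) (out : Int) : Prop := out = fat_alloc_chain_alt fat num_clusters needed
instance (fat : List Int) (num_clusters : Int) (needed : Int) (out : Int) : Decidable (Spec_fat_alloc_chain fat num_clusters needed out) := by unfold Spec_fat_alloc_chain; infer_instance

-- ===== CLAIM (what is proved, stated in full; the proofs are below) =====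
def Claim_equal_fat_alloc_chain : Prop := ∀ (fat : List Int) (num_clusters : Int) (needed : Int), Dom_fat_alloc_chain fat num_clusters needed → Pre_fat_alloc_chain fat num_clusters needed → Spec_fat_alloc_chain fat num_clusters needed (fat_alloc_chain fat num_clusters needed)

-- ===== LEMMAS AND PROOFS =====

-- head-or-(-1), the value A's `first` register tracks.
def pvHeadD (l : List Int) : Int := match l with | [] => -1 | c :: _ => c

-- The two loops compute the same summary: A's (first, allocated) registers equal
-- (head, length) of B's `chosen` list.  Holds on ALL inputs (on an IndexError both
-- loops stop with allocated = chosen.length < needed, and both programs yield -1).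
lemma loop_equiv (num_clusters needed : Int) :
    ∀ (fuel : Nat) (fat0 fatA chosen : List Int) (i : Int),
    0 ≤ i →
    fatA.length = fat0.length →
    (∀ j : Nat, i ≤ (j : Int) → fatA[j]? = fat0[j]?) →
    (∀ c ∈ chosen, 0 ≤ c ∧ c < i) →
    fatAllocLoopA num_clusters needed fuel fatA (pvHeadD chosen)
        ((chosen.getLast?).getD (-1)) (chosen.length : Int) i =
      (pvHeadD (fatAllocLoopB num_clusters needed fuel fat0 chosen i),
       ((fatAllocLoopB num_clusters needed fuel fat0 chosen i).length : Int)) := by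
  intro fuel
  induction fuel with
  | zero => intro fat0 fatA chosen i _ _ _ _; simp [fatAllocLoopA, fatAllocLoopB]
  | succ fuel ih =>
    intro fat0 fatA chosen i hi hlen hagree hmem
    simp only [fatAllocLoopA, fatAllocLoopB]
    by_cases hlt : i < num_clusters
    · by_cases hfull : (chosen.length : Int) < needed
      · have hget : PySem.List.pyGet? fatA i = PySem.List.pyGet? fat0 i := by
          have hi' : i = ((i.toNat : Nat) : Int) := (Int.toNat_of_nonneg hi).symm
          rw [hi', PySem.List.pyGet?_natCast, PySem.List.pyGet?_natCast]
          exact hagree i.toNat (by omega)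
        simp only [hlt, hfull, and_self, if_pos]
        rw [if_neg (by omega : ¬ (chosen.length : Int) ≥ needed), hget]
        cases hg0 : PySem.List.pyGet? fat0 i with
        | none => simp
        | some f =>
          by_cases hf : f = -1
          · -- free cluster: A updates registers, B appends i
            have hne : chosen ≠ [] → 0 ≤ (chosen.getLast?).getD (-1) ∧
                (chosen.getLast?).getD (-1) < i := by
              intro h
              rcases List.eq_nil_or_concat chosen with rfl | ⟨t, c, rfl⟩
              · exact absurd rfl h
              · have := hmem c (by simp)
                have h2 : ((t.concat c).getLast?).getD (-1) = c := by
                  simp [List.concat_eq_append, List.getLast?_append]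
                rw [h2]
                omega
            have hfirst : pvHeadD (chosen ++ [i]) =
                (if pvHeadD chosen < 0 then i else pvHeadD chosen) := by
              cases chosen with
              | nil => simp [pvHeadD]
              | cons c t =>
                have := hmem c (by simp)
                simp [pvHeadD]; omega
            have hprev : ((chosen ++ [i]).getLast?).getD (-1) = i := by
              simp [List.getLast?_append]
            have hlenA :
                ((if (chosen.getLast?).getD (-1) ≥ 0 then
                    fatA.set ((chosen.getLast?).getD (-1)).toNat i
                  else fatA).set i.toNat (-2)).length = fat0.length := by
              split_ifs <;> simp [hlen]
            have hagree' : ∀ j : Nat, i + 1 ≤ (j : Int) →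
                ((if (chosen.getLast?).getD (-1) ≥ 0 then
                    fatA.set ((chosen.getLast?).getD (-1)).toNat i
                  else fatA).set i.toNat (-2))[j]? = fat0[j]? := by
              intro j hj
              have hji : i.toNat ≠ j := by omega
              rw [List.getElem?_set_ne hji]
              split_ifs with hp
              · have hpi : (chosen.getLast?).getD (-1) < i := by
                  rcases List.eq_nil_or_concat chosen with h | ⟨t, c, rfl⟩
                  · simp [h] at hp
                  · exact (hne (by simp)).2
                have : ((chosen.getLast?).getD (-1)).toNat ≠ j := by omega
                rw [List.getElem?_set_ne this]
                exact hagree j (by omega)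
              · exact hagree j (by omega)
            have := ih fat0
              ((if (chosen.getLast?).getD (-1) ≥ 0 then
                  fatA.set ((chosen.getLast?).getD (-1)).toNat i
                else fatA).set i.toNat (-2))
              (chosen ++ [i]) (i + 1) (by omega) hlenA hagree'
              (by intro c hc; rcases List.mem_append.mp hc with h | h
                  · have := hmem c h; omega
                  · simp at h; omega)
            rw [hprev] at this
            rw [hfirst] at this
            rw [show ((chosen ++ [i]).length : Int) = (chosen.length : Int) + 1 by
              simp] at this
            simp only [hf]
            exact this
          · simp only [hf]
            exact ih fat0 fatA chosen (i + 1) (by omega) hlen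
              (fun j hj => hagree j (by omega))
              (fun c hc => by have := hmem c hc; omega)
      · simp [hlt, hfull, if_pos (by omega : (chosen.length : Int) ≥ needed)]
    · simp [hlt]

-- ===== VERDICT (by name: the statement is the Claim_ definition above) =====
theorem fat_alloc_chain_spec : Claim_equal_fat_alloc_chain := by
  intro fat num_clusters needed _ _
  unfold Spec_fat_alloc_chain fat_alloc_chain fat_alloc_chain_alt
  by_cases h0 : needed = 0
  · simp [h0]
  · simp only [h0, if_false]
    rw [show (0:Int) - 1 = -1 by norm_num]
    have h := loop_equiv num_clusters needed num_clusters.toNat fat fat [] 0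
      le_rfl rfl (fun _ _ => rfl) (by simp)
    simp only [pvHeadD, List.getLast?_nil, Option.getD_none, List.length_nil,
      Int.natCast_zero] at h
    rw [h]
    set ch := fatAllocLoopB num_clusters needed num_clusters.toNat fat [] 0 with hch
    by_cases hlen : (ch.length : Int) < needed
    · simp [hlen, not_le.mpr hlen]
    · cases hc : ch with
      | nil => simp
      | cons c t =>
        simp [List.headI]
        split_ifs <;> omega
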